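-- pv_equiv track=rewrite | github.com/jsatt/advent | 2022/d6/p1.py | find_distinct
-- ===== SOURCE A (Python) =====
-- from collections import Counter
--
-- def find_distinct(stream, count):
--     for idx, char in enumerate(stream):
--         if idx >= count:
--             substr = stream[idx - count:idx]
--             counts = Counter(substr).most_common()
--             if counts and counts[0][1] == 1:
--                 return idx
--     return -1
-- ===== SOURCE B (Python) =====
-- def find_distinct(stream, count):
--     # Sliding window: maintain per-char frequencies for the last `count` chars
--     # and the number of chars currently duplicated; O(n) instead of O(n*count).
--     if count <= 0:
--         return -1
--     freq = {}
--     dups = 0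
--     for i, ch in enumerate(stream):
--         if i >= count:
--             if dups == 0:
--                 return i
--             out = stream[i - count]
--             freq[out] = freq.get(out, 0) - 1
--             if freq[out] == 1:
--                 dups -= 1
--         freq[ch] = freq.get(ch, 0) + 1
--         if freq[ch] == 2:
--             dups += 1
--     return -1
-- ===== Notes on version B (the rewrite author's own statement) =====
-- stated objective: faster
-- what changed: Replaces the per-index Counter-build-and-sort over the whole window with a sliding window that incrementally updates a frequency dict and a duplicate counter.
import Mathlib
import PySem

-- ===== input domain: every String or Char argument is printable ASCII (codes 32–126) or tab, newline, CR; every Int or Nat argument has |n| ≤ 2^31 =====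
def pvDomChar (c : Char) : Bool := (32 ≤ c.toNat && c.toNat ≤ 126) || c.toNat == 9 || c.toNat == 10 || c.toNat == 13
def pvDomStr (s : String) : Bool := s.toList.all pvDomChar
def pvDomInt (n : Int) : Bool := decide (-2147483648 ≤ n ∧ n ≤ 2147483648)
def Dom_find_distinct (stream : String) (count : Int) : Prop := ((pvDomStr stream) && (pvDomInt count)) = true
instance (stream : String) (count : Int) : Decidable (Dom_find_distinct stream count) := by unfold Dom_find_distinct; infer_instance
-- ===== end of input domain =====

-- B replaces A's per-index Counter-build-and-sort of the window by a sliding window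
-- with an incremental frequency dict and duplicate counter (objective: faster).

-- ===== PORT A =====
-- for idx, char in enumerate(stream): if idx >= count: recount the window and sort by count
def find_distinct_goA (stream : List Char) (count : Int) : List (Int × Char) → Int
  | [] => -1
  | (idx, _ch) :: rest =>
    if count ≤ idx then
      let substr := PySem.List.slice stream (some (idx - count)) (some idx)
      let counts := PySem.List.sorted (PySem.Dict.counter substr).items (fun p => p.2) true
      match counts with
      | (_, c) :: _ => if c == 1 then idx else find_distinct_goA stream count rest
      | [] => find_distinct_goA stream count rest
    else find_distinct_goA stream count rest

def find_distinct (stream : String) (count : Int) : Int :=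
  find_distinct_goA stream.toList count (PySem.List.enumerate stream.toList 0)

-- ===== PORT B =====
-- freq[ch] = freq.get(ch, 0) + 1; if freq[ch] == 2: dups += 1
def bAdd (freq : PySem.Dict Char Int) (dups : Int) (ch : Char) : PySem.Dict Char Int × Int :=
  let f := freq.insert ch (freq.getD ch 0 + 1)
  (f, if f.getD ch 0 == 2 then dups + 1 else dups)

def find_distinct_goB (stream : List Char) (count : Int) :
    List (Int × Char) → PySem.Dict Char Int → Int → Int
  | [], _, _ => -1
  | (i, ch) :: rest, freq, dups =>
    if count ≤ i then
      if dups == 0 then i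
      else
        let out := PySem.List.pyGetD stream (i - count) ' '  -- stream[i-count]; always in range here
        let freq' := freq.insert out (freq.getD out 0 - 1)
        let dups' := if freq'.getD out 0 == 1 then dups - 1 else dups
        let s := bAdd freq' dups' ch
        find_distinct_goB stream count rest s.1 s.2
    else
      let s := bAdd freq dups ch
      find_distinct_goB stream count rest s.1 s.2

def find_distinct_alt (stream : String) (count : Int) : Int :=
  if count ≤ 0 then -1
  else find_distinct_goB stream.toList count (PySem.List.enumerate stream.toList 0) PySem.Dict.empty 0

-- ===== PRECONDITION & SPEC =====
def Spec_find_distinct (stream : String) (count : Int) (out : Int) : Prop := out = find_distinct_alt stream count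
instance (stream : String) (count : Int) (out : Int) : Decidable (Spec_find_distinct stream count out) := by unfold Spec_find_distinct; infer_instance

-- ===== CLAIM (what is proved, stated in full; the proofs are below) =====
def Claim_equal_find_distinct : Prop := ∀ (stream : String) (count : Int), Dom_find_distinct stream count → Spec_find_distinct stream count (find_distinct stream count)

-- ===== LEMMAS AND PROOFS =====

-- the window B maintains after consuming the prefix `pre`: its last `k` characters
def winOf (k : Nat) (pre : List Char) : List Char := pre.drop (pre.length - k)

-- number of characters currently duplicated in a window (B's `dups`)
def dupCount (w : List Char) : Nat :=
  (w.toFinset.filter (fun c => 2 ≤ w.count c)).card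

theorem dupCount_nil : dupCount [] = 0 := by decide

theorem dupCount_perm {w w' : List Char} (h : w.Perm w') : dupCount w = dupCount w' := by
  unfold dupCount
  congr 1
  apply Finset.ext
  intro x
  simp only [Finset.mem_filter, List.mem_toFinset, h.mem_iff, h.count_eq]

theorem dupCount_cons (c : Char) (t : List Char) :
    dupCount (c :: t) = if t.count c = 1 then dupCount t + 1 else dupCount t := by
  unfold dupCount
  have hcc : ∀ x : Char, (c :: t).count x = t.count x + if x = c then 1 else 0 := by
    intro x
    rcases eq_or_ne x c with h | h
    · simp [List.count_cons, h]
    · simp [List.count_cons, h, h.symm]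
  rcases Nat.lt_or_ge (t.count c) 1 with h0 | h1
  · have hc0 : t.count c = 0 := by omega
    have hnm : c ∉ t := fun hm => by have := List.count_pos_iff.mpr hm; omega
    have hset : (c :: t).toFinset.filter (fun x => 2 ≤ (c :: t).count x)
        = t.toFinset.filter (fun x => 2 ≤ t.count x) := by
      apply Finset.ext; intro x
      simp only [Finset.mem_filter, List.mem_toFinset, List.mem_cons, hcc]
      constructor
      · rintro ⟨hx, hcx⟩
        by_cases hxc : x = c
        · subst hxc; rw [if_pos rfl] at hcx; omega
        · rw [if_neg hxc] at hcx
          exact ⟨hx.resolve_left hxc, by omega⟩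
      · rintro ⟨hx, hcx⟩
        have hxc : x ≠ c := fun h => hnm (h ▸ hx)
        exact ⟨Or.inr hx, by rw [if_neg hxc]; omega⟩
    rw [hset]; simp [show ¬ t.count c = 1 by omega]
  · rcases Nat.lt_or_ge (t.count c) 2 with h1' | h2
    · have hc1 : t.count c = 1 := by omega
      have hm : c ∈ t := List.count_pos_iff.mp (by omega)
      have hset : (c :: t).toFinset.filter (fun x => 2 ≤ (c :: t).count x)
          = insert c (t.toFinset.filter (fun x => 2 ≤ t.count x)) := by
        apply Finset.ext; intro x
        simp only [Finset.mem_filter, List.mem_toFinset, List.mem_cons, Finset.mem_insert, hcc]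
        by_cases hxc : x = c
        · subst hxc; simp [hc1, hm]
        · rw [if_neg hxc]
          constructor
          · rintro ⟨hx, hcx⟩
            exact Or.inr ⟨hx.resolve_left hxc, by omega⟩
          · rintro (h | ⟨hx, hcx⟩)
            · exact absurd h hxc
            · exact ⟨Or.inr hx, by omega⟩
      rw [hset, Finset.card_insert_of_notMem (by simp [hc1])]
      simp [hc1]
    · have hm : c ∈ t := List.count_pos_iff.mp (by omega)
      have hset : (c :: t).toFinset.filter (fun x => 2 ≤ (c :: t).count x)
          = t.toFinset.filter (fun x => 2 ≤ t.count x) := by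
        apply Finset.ext; intro x
        simp only [Finset.mem_filter, List.mem_toFinset, List.mem_cons, hcc]
        by_cases hxc : x = c
        · subst hxc; rw [if_pos rfl]
          constructor
          · rintro ⟨_, _⟩; exact ⟨hm, by omega⟩
          · rintro ⟨_, _⟩; exact ⟨Or.inl rfl, by omega⟩
        · rw [if_neg hxc]
          constructor
          · rintro ⟨hx, hcx⟩; exact ⟨hx.resolve_left hxc, by omega⟩
          · rintro ⟨hx, hcx⟩; exact ⟨Or.inr hx, by omega⟩
      rw [hset]; simp [show ¬ t.count c = 1 by omega]

theorem dupCount_append (w : List Char) (ch : Char) :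
    dupCount (w ++ [ch]) = if w.count ch = 1 then dupCount w + 1 else dupCount w := by
  rw [dupCount_perm (List.perm_append_singleton ch w), dupCount_cons]

theorem dupCount_eq_zero_iff (w : List Char) : dupCount w = 0 ↔ w.Nodup := by
  unfold dupCount
  rw [Finset.card_eq_zero, Finset.filter_eq_empty_iff, List.nodup_iff_count_le_one]
  constructor
  · intro h a
    by_cases hm : a ∈ w
    · have := h (List.mem_toFinset.mpr hm); omega
    · simp [List.count_eq_zero_of_not_mem hm]
  · intro h x hx
    have := h x; omega

-- A's window check: the head of Counter(w).most_common() has multiplicity 1 iff w has no duplicates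
theorem most_common_head (w : List Char) (hw : w ≠ []) :
    ∃ pk pv rest, PySem.List.sorted (PySem.Dict.counter w).items (fun q => q.2) true = (pk, pv) :: rest ∧
      ((pv == (1 : Int)) = true ↔ w.Nodup) := by
  set L := PySem.List.sorted (PySem.Dict.counter w).items (fun q => q.2) true with hL
  have hperm : L.Perm (PySem.Dict.counter w).items := PySem.List.sorted_perm _ _ _
  have hitems := PySem.Dict.items_counter w
  have hne : L ≠ [] := by
    intro h
    have hinil : (PySem.Dict.counter w).items = [] := ((h ▸ hperm).symm).eq_nil
    rw [hitems] at hinil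
    have hof : PySem.Set.ofList w = [] := List.map_eq_nil_iff.mp hinil
    rcases List.exists_mem_of_ne_nil w hw with ⟨x, hx⟩
    have hxm : x ∈ PySem.Set.ofList w := (PySem.Set.mem_ofList w x).mpr hx
    rw [hof] at hxm
    simp at hxm
  rcases hLc : L with _ | ⟨p, rest⟩
  · exact absurd hLc hne
  obtain ⟨pk, pv⟩ := p
  refine ⟨pk, pv, rest, hLc ▸ hL.symm ▸ rfl, ?_⟩
  have hpair : List.Pairwise (fun a b : Char × Int => b.2 ≤ a.2) ((pk, pv) :: rest) :=
    hLc ▸ PySem.List.sorted_pairwise_rev _ _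
  have hmemp : (pk, pv) ∈ (PySem.Dict.counter w).items := hperm.mem_iff.mp (hLc ▸ List.mem_cons_self ..)
  rw [hitems] at hmemp
  rcases List.mem_map.mp hmemp with ⟨k0, hk0, hpk⟩
  have hk0w : k0 ∈ w := (PySem.Set.mem_ofList w k0).mp hk0
  have hp2 : pv = (w.count k0 : Int) := by rw [← (Prod.mk.injEq ..).mp hpk |>.2]
  constructor
  · intro h1
    have h1' : pv = 1 := by simpa using h1
    rw [List.nodup_iff_count_le_one]
    intro a
    by_cases ha : a ∈ w
    · have hmem : (a, (w.count a : Int)) ∈ (PySem.Dict.counter w).items := by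
        rw [hitems]
        exact List.mem_map.mpr ⟨a, (PySem.Set.mem_ofList w a).mpr ha, rfl⟩
      have hmemL : (a, (w.count a : Int)) ∈ (pk, pv) :: rest := hLc ▸ hperm.mem_iff.mpr hmem
      rcases List.mem_cons.mp hmemL with h | h
      · have hca : (w.count a : Int) = 1 := by rw [← h1', ← ((Prod.mk.injEq ..).mp h).2]
        omega
      · have := (List.pairwise_cons.mp hpair).1 _ h
        simp only at this
        rw [h1'] at this
        omega
    · simp [List.count_eq_zero_of_not_mem ha]
  · intro hnd
    have hc1 : w.count k0 = 1 := by
      have hle := List.nodup_iff_count_le_one.mp hnd k0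
      have hpos := List.count_pos_iff.mpr hk0w
      omega
    simp [hp2, hc1]

-- A returns -1 when count <= 0 (every window slice is empty)
theorem goA_nonpos (stream : List Char) (count : Int) (hc : count ≤ 0) :
    ∀ (suf : List Char) (n : Nat),
      find_distinct_goA stream count (PySem.List.enumerate suf (n : Int)) = -1 := by
  intro suf
  induction suf with
  | nil => intro n; simp [find_distinct_goA, PySem.List.enumerate]
  | cons ch rest ih =>
    intro n
    rw [PySem.List.enumerate_cons]
    have hrec : ((n : Int) + 1) = ((n + 1 : Nat) : Int) := by push_cast; ring
    by_cases h : count ≤ (n : Int)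
    · have hempty : PySem.List.slice stream (some ((n : Int) - count)) (some (n : Int)) = [] := by
        rw [PySem.List.slice_toNat stream (by omega) (by exact_mod_cast Nat.zero_le n)]
        rw [show (n : Int).toNat - ((n : Int) - count).toNat = 0 from by omega, List.take_zero]
      simp only [find_distinct_goA, if_pos h, hempty]
      rw [show PySem.List.sorted (PySem.Dict.counter ([] : List Char)).items (fun q => q.2) true = [] from by decide]
      rw [hrec]; exact ih (n + 1)
    · simp only [find_distinct_goA, if_neg h]
      rw [hrec]; exact ih (n + 1)

-- main sliding-window invariant: A and B agree on the remaining suffix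
theorem main_ind (k : Nat) (hk : 1 ≤ k) (stream : List Char) :
    ∀ (suf pre : List Char) (freq : PySem.Dict Char Int) (dups : Int),
      stream = pre ++ suf →
      (∀ c, freq.getD c 0 = ((winOf k pre).count c : Int)) →
      dups = (dupCount (winOf k pre) : Int) →
      find_distinct_goA stream (k : Int) (PySem.List.enumerate suf (pre.length : Int)) =
        find_distinct_goB stream (k : Int) (PySem.List.enumerate suf (pre.length : Int)) freq dups := by
  intro suf
  induction suf with
  | nil =>
    intro pre freq dups _ _ _
    simp [find_distinct_goA, find_distinct_goB, PySem.List.enumerate]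
  | cons ch rest ih =>
    intro pre freq dups hpre hfreq hdups
    rw [PySem.List.enumerate_cons]
    have hstep : ((pre.length : Int) + 1) = (((pre ++ [ch]).length : Nat) : Int) := by
      simp
    by_cases hki : (k : Int) ≤ (pre.length : Int)
    · -- idx ≥ count : both examine the window
      have hkn : k ≤ pre.length := by exact_mod_cast hki
      set j := pre.length - k with hj
      have hwin : winOf k pre = pre.drop j := rfl
      have hwlen : (pre.drop j).length = k := by rw [List.length_drop]; omega
      -- A's slice is exactly the current window
      have hslice : PySem.List.slice stream (some ((pre.length : Int) - (k : Int))) (some (pre.length : Int)) = pre.drop j := by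
        have hcast : ((pre.length : Int) - (k : Int)) = ((j : Nat) : Int) := by push_cast; omega
        rw [hcast, PySem.List.slice_natCast, hpre, List.drop_append_of_le_length (by omega)]
        rw [show pre.length - j = (pre.drop j).length from by rw [List.length_drop]]
        exact List.take_left
      have hwne : pre.drop j ≠ [] := by
        intro h; rw [h] at hwlen; simp at hwlen; omega
      rcases most_common_head (pre.drop j) hwne with ⟨pk, pv, prest, hsort, hiff⟩
      by_cases hnd : (pre.drop j).Nodup
      · -- duplicate-free window: both return the current index
        have hdz : (dups == 0) = true := by
          rw [hdups, hwin]
          simp [(dupCount_eq_zero_iff _).mpr hnd]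
        have hp1 : (pv == (1 : Int)) = true := hiff.mpr hnd
        simp only [find_distinct_goA, find_distinct_goB, hslice, hsort, if_pos hki,
          if_pos hp1, if_pos hdz]
      · -- window has a duplicate: both slide the window and recurse
        have hdnz : ¬ ((dups == 0) = true) := by
          intro h
          have h0 : dupCount (winOf k pre) = 0 := by
            have := hdups ▸ (beq_iff_eq.mp h)
            exact_mod_cast this
          rw [hwin] at h0
          exact hnd ((dupCount_eq_zero_iff _).mp h0)
        have hp1 : ¬ ((pv == (1 : Int)) = true) := fun h => hnd (hiff.mp h)
        have hjlt : j < pre.length := by omega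
        have hout : PySem.List.pyGetD stream ((pre.length : Int) - (k : Int)) ' ' = pre[j] := by
          have hcast : ((pre.length : Int) - (k : Int)) = ((j : Nat) : Int) := by push_cast; omega
          rw [hcast, PySem.List.pyGetD_natCast, hpre]
          rw [List.getD_eq_getElem?_getD, List.getElem?_append_left hjlt]
          simp [hjlt]
        have hdroptail : pre.drop j = pre[j] :: pre.drop (j + 1) :=
          List.drop_eq_getElem_cons hjlt
        set t := pre.drop (j + 1) with ht
        have hwin' : winOf k (pre ++ [ch]) = t ++ [ch] := by
          unfold winOf
          rw [List.length_append, List.length_singleton,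
            show pre.length + 1 - k = j + 1 from by omega,
            List.drop_append_of_le_length (by omega)]
        have hcount : ∀ c, (winOf k pre).count c = t.count c + if c = pre[j] then 1 else 0 := by
          intro c
          rw [hwin, hdroptail, List.count_cons]
          rcases eq_or_ne c pre[j] with h | h
          · simp [h]
          · simp [h, h.symm]
        have hfreq' : ∀ c, ((freq.insert pre[j] (freq.getD pre[j] 0 - 1)).getD c 0) = (t.count c : Int) := by
          intro c
          rw [PySem.Dict.getD_insert]
          rcases eq_or_ne c pre[j] with h | h
          · rw [if_pos h, hfreq, hcount, h]
            simp
          · rw [if_neg h, hfreq, hcount, if_neg h]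
            simp
        have hDold : dupCount (pre.drop j) = (if t.count pre[j] = 1 then dupCount t + 1 else dupCount t) := by
          rw [hdroptail, dupCount_cons]
        simp only [find_distinct_goA, find_distinct_goB, hslice, hsort, if_pos hki,
          if_neg hp1, if_neg hdnz, hout]
        rw [hstep]
        apply ih
        · rw [hpre]; simp
        · -- frequency invariant after remove + add
          intro c
          simp only [bAdd, PySem.Dict.getD_insert, hwin', hfreq']
          rcases eq_or_ne c ch with h | h
          · subst h
            rw [if_pos rfl, List.count_append]
            simp
          · rw [if_neg h, List.count_append]
            simp [h, h.symm]
        · -- duplicate-count invariant after remove + add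
          simp only [bAdd, PySem.Dict.getD_insert, eq_self_iff_true, if_true, hwin', hfreq']
          rw [dupCount_append]
          have hcondB : ((t.count ch : Int) + 1 == 2) = ((t.count ch : Int) + 1 == 2) := rfl
          by_cases hct1 : t.count ch = 1
          · rw [if_pos hct1, if_pos (show ((t.count ch : Int) + 1 == 2) = true from by rw [hct1]; decide)]
            by_cases hro : t.count pre[j] = 1
            · rw [if_pos (show ((t.count pre[j] : Int) == 1) = true from by rw [hro]; decide)]
              rw [hdups, hwin, hDold, if_pos hro]; push_cast; ring
            · rw [if_neg (show ¬ (((t.count pre[j] : Int) == 1) = true) from by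
                intro h; exact hro (by exact_mod_cast beq_iff_eq.mp h))]
              rw [hdups, hwin, hDold, if_neg hro]; push_cast; ring
          · rw [if_neg hct1, if_neg (show ¬ (((t.count ch : Int) + 1 == 2) = true) from by
              intro h
              have : (t.count ch : Int) + 1 = 2 := beq_iff_eq.mp h
              exact hct1 (by omega))]
            by_cases hro : t.count pre[j] = 1
            · rw [if_pos (show ((t.count pre[j] : Int) == 1) = true from by rw [hro]; decide)]
              rw [hdups, hwin, hDold, if_pos hro]; push_cast; ring
            · rw [if_neg (show ¬ (((t.count pre[j] : Int) == 1) = true) from by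
                intro h; exact hro (by exact_mod_cast beq_iff_eq.mp h))]
              rw [hdups, hwin, hDold, if_neg hro]
    · -- idx < count : the window only grows
      have hwin : winOf k pre = pre := by
        unfold winOf
        rw [Nat.sub_eq_zero_of_le (by omega : pre.length ≤ k), List.drop_zero]
      have hwin' : winOf k (pre ++ [ch]) = pre ++ [ch] := by
        unfold winOf
        rw [Nat.sub_eq_zero_of_le (by simp; omega), List.drop_zero]
      simp only [find_distinct_goA, find_distinct_goB, if_neg hki]
      rw [hstep]
      apply ih
      · rw [hpre]; simp
      · intro c
        simp only [bAdd, PySem.Dict.getD_insert, hwin']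
        rcases eq_or_ne c ch with h | h
        · subst h
          rw [if_pos rfl, hfreq, hwin, List.count_append]
          simp
        · rw [if_neg h, hfreq, hwin, List.count_append]
          simp [h, h.symm]
      · simp only [bAdd, PySem.Dict.getD_insert, eq_self_iff_true, if_true, hwin']
        rw [dupCount_append]
        by_cases h1 : pre.count ch = 1
        · rw [if_pos h1, if_pos (show ((freq.getD ch 0 + 1) == 2) = true from by
            rw [hfreq, hwin, h1]; decide)]
          rw [hdups, hwin]; push_cast; ring
        · rw [if_neg h1, if_neg (show ¬ (((freq.getD ch 0 + 1) == 2) = true) from by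
            rw [hfreq, hwin]
            intro h
            have : (pre.count ch : Int) + 1 = 2 := beq_iff_eq.mp h
            exact h1 (by omega))]
          rw [hdups, hwin]

-- ===== VERDICT (by name: the statement is the Claim_ definition above) =====
theorem find_distinct_spec : Claim_equal_find_distinct := by
  intro stream count _
  unfold Spec_find_distinct find_distinct find_distinct_alt
  by_cases hc : count ≤ 0
  · rw [if_pos hc]
    have h := goA_nonpos stream.toList count hc stream.toList 0
    simpa using h
  · rw [if_neg hc]
    have hk : 1 ≤ count.toNat := by omega
    have hcast : count = (count.toNat : Int) := by omega
    rw [hcast]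
    have h := main_ind count.toNat hk stream.toList stream.toList [] PySem.Dict.empty 0
      (by simp)
      (by intro c; simp [winOf, PySem.Dict.getD, PySem.Dict.empty, PySem.Dict.get?])
      (by simp [winOf, dupCount_nil])
    simpa using h
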